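-- pv_equiv track=rewrite | github.com/Declan-Bracken/MEng_Project | TableReconstruction/column_clustering/column_clusterer.py | compute_relative_features
-- ===== SOURCE A (Python) =====
-- def compute_relative_features(positions):
--     relative_features = []
--     num_positions = len(positions)
--
--     for i, (x1, x2) in enumerate(positions):
--         width = x2 - x1
--
--         prev_x1, prev_x2 = positions[i - 1] if i > 0 else (x1, x1)
--         next_x1, next_x2 = positions[i + 1] if i < num_positions - 1 else (x2, x2)
--
--         prev_distance = x1 - prev_x2
--         next_distance = next_x1 - x2
--
--         relative_features.append([x1, x2, width, prev_distance, next_distance])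
--
--     return relative_features
-- ===== SOURCE B (Python) =====
-- def compute_relative_features(positions):
--     gaps = [cur[0] - prev[1] for prev, cur in zip(positions, positions[1:])]
--     prev_distances = [0] + gaps
--     next_distances = gaps + [0]
--     return [[x1, x2, x2 - x1, pd, nd]
--             for (x1, x2), pd, nd in zip(positions, prev_distances, next_distances)]
-- ===== Notes on version B (the rewrite author's own statement) =====
-- stated objective: simpler
-- what changed: Replaces the per-index neighbor lookups (positions[i-1]/positions[i+1] with boundary conditionals) by one pairwise pass computing the shared adjacent-gap array, which is reused shifted as both prev_distances ([0]+gaps) and next_distances (gaps+[0]).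
import Mathlib
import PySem

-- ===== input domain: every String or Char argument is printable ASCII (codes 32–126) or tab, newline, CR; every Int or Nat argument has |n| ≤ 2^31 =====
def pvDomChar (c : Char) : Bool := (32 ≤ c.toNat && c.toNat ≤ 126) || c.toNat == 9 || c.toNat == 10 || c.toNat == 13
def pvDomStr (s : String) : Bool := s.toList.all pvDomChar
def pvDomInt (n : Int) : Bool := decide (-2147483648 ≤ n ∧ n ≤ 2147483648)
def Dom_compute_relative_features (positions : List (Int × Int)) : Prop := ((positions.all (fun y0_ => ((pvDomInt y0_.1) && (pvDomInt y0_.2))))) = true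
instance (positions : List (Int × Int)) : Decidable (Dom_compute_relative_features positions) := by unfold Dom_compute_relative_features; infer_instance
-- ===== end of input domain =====

-- B computes the adjacent-gap array once in a pairwise pass and reuses it, shifted, as both
-- neighbor-distance fields; A instead looks up positions[i-1]/positions[i+1] per index with
-- boundary conditionals (equal cost; objective: simpler decomposition).

-- ===== PORT A =====
-- literal transliteration of A's loop: append to an accumulator over enumerate(positions),
-- with the guarded neighbor lookups (indices are always in range when the guard holds).
def compute_relative_features (positions : List (Int × Int)) : List (List Int) :=
  let num_positions : Int := positions.length
  (PySem.List.enumerate positions).foldl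
    (fun relative_features p =>
      let i := p.1
      let x1 := p.2.1
      let x2 := p.2.2
      let width := x2 - x1
      let prev := if i > 0 then PySem.List.pyGetD positions (i - 1) (x1, x1) else (x1, x1)
      let next := if i < num_positions - 1 then PySem.List.pyGetD positions (i + 1) (x2, x2) else (x2, x2)
      relative_features ++ [[x1, x2, width, x1 - prev.2, next.1 - x2]]) []

-- ===== PORT B =====
def compute_relative_features_alt (positions : List (Int × Int)) : List (List Int) :=
  let gaps := (positions.zip positions.tail).map (fun pc => pc.2.1 - pc.1.2)
  let prev_distances := 0 :: gaps
  let next_distances := gaps ++ [0]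
  ((positions.zip prev_distances).zip next_distances).map
    (fun t => [t.1.1.1, t.1.1.2, t.1.1.2 - t.1.1.1, t.1.2, t.2])

-- ===== PRECONDITION & SPEC =====
def Spec_compute_relative_features (positions : List (Int × Int)) (out : List (List Int)) : Prop := out = compute_relative_features_alt positions
instance (positions : List (Int × Int)) (out : List (List Int)) : Decidable (Spec_compute_relative_features positions out) := by unfold Spec_compute_relative_features; infer_instance

-- ===== CLAIM (what is proved, stated in full; the proofs are below) =====
def Claim_equal_compute_relative_features : Prop := ∀ (positions : List (Int × Int)), Dom_compute_relative_features positions → Spec_compute_relative_features positions (compute_relative_features positions)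

-- ===== LEMMAS AND PROOFS =====

theorem compute_relative_features_eq_map (positions : List (Int × Int)) :
    compute_relative_features positions =
      (PySem.List.enumerate positions).map (fun p =>
        let i := p.1
        let x1 := p.2.1
        let x2 := p.2.2
        let prev := if i > 0 then PySem.List.pyGetD positions (i - 1) (x1, x1) else (x1, x1)
        let next := if i < (positions.length : Int) - 1 then PySem.List.pyGetD positions (i + 1) (x2, x2) else (x2, x2)
        [x1, x2, x2 - x1, x1 - prev.2, next.1 - x2]) := by
  unfold compute_relative_features
  rw [PySem.List.foldl_append_singleton_eq_map]
  simp

-- ===== VERDICT (by name: the statement is the Claim_ definition above) =====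
theorem compute_relative_features_spec : Claim_equal_compute_relative_features := by
  intro positions _
  unfold Spec_compute_relative_features compute_relative_features_alt
  rw [compute_relative_features_eq_map]
  apply List.ext_getElem
  · simp [PySem.List.length_enumerate, List.length_zip, List.length_tail]
    omega
  · intro k h1 h2
    simp only [List.length_map, PySem.List.length_enumerate] at h1
    have hk : k < positions.length := h1
    simp only [List.getElem_map, PySem.List.getElem_enumerate, List.getElem_zip]
    simp only [List.cons.injEq, and_true, true_and]
    constructor
    · -- prev-distance field
      rcases Nat.eq_zero_or_pos k with hk0 | hk0
      · subst hk0; simp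
      · obtain ⟨j, rfl⟩ : ∃ j, k = j + 1 := ⟨k - 1, by omega⟩
        have hc : (0 : Int) + ↑(j + 1) > 0 := by omega
        have hi : (0 : Int) + ↑(j + 1) - 1 = ((j : Nat) : Int) := by omega
        rw [if_pos hc, hi, PySem.List.pyGetD_natCast,
          List.getD_eq_getElem _ _ (by omega), List.getElem_cons_succ]
        simp [List.getElem_tail]
    · -- next-distance field
      have hg : ((positions.zip positions.tail).map (fun pc => pc.2.1 - pc.1.2)).length
          = positions.length - 1 := by
        simp [List.length_zip, List.length_tail]
      by_cases hkl : k < positions.length - 1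
      · have hc : (0 : Int) + ↑k < (positions.length : Int) - 1 := by omega
        have hi : (0 : Int) + ↑k + 1 = ((k + 1 : Nat) : Int) := by omega
        rw [if_pos hc, hi, PySem.List.pyGetD_natCast,
          List.getD_eq_getElem _ _ (by omega),
          List.getElem_append_left (by omega)]
        simp [List.getElem_tail]
      · have hc : ¬ ((0 : Int) + ↑k < (positions.length : Int) - 1) := by omega
        have hke : k = ((positions.zip positions.tail).map (fun pc => pc.2.1 - pc.1.2)).length := by omega
        rw [if_neg hc]
        subst hke
        simp
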